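-- pv_equiv track=rewrite | github.com/cryoem/eman2 | libpyEM/EMAN2fsc.py | get_convergence_results_list
-- ===== SOURCE A (Python) =====
-- def get_convergence_results_list(keys):
-- 	'''
-- 	Extract the names from the keys that match the e2refine.py convergence plot output naming convention
-- 	(keys is a list of keys in the convergence.results dictionary, in a refinement directory)
-- 	'''
-- 	solns = []
-- 	if "init_00_fsc" in keys:
-- 		solns.append("init_00_fsc")
--
-- 	i = 0
-- 	while True:
-- 		s1 = str(i)
-- 		s2 = str(i+1)
-- 		if len(s1) == 1: s1 = "0"+s1
-- 		if len(s2) == 1: s2 = "0"+s2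
-- 		k = s1+"_"+s2+"_fsc"
-- 		if k in keys:
-- 			solns.append(k)
-- 		else:
-- 			break
--
-- 		i += 1
--
-- 	return solns
-- ===== SOURCE B (Python) =====
-- def get_convergence_results_list(keys):
-- 	'''
-- 	Parse-then-walk re-implementation: one parsing pass collects the indices of
-- 	keys that have the canonical consecutive-FSC form into a set; the result is
-- 	then produced as the canonical keys for 0..r-1 where r is the first gap in
-- 	the sorted index set (with "init_00_fsc" prepended if present).
-- 	'''
-- 	idxs = set()
-- 	init = False
-- 	for k in keys:
-- 		if k == "init_00_fsc":
-- 			init = True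
-- 			continue
-- 		parts = k.split("_")
-- 		if len(parts) == 3 and parts[0].isdigit():
-- 			i = 0
-- 			for c in parts[0]:
-- 				i = i * 10 + (ord(c) - 48)
-- 			if k == _canon(i):
-- 				idxs.add(i)
-- 	run = 0
-- 	for v in sorted(idxs):
-- 		if v != run:
-- 			break
-- 		run += 1
-- 	return (["init_00_fsc"] if init else []) + [_canon(i) for i in range(run)]
--
-- def _canon(i):
-- 	a = str(i)
-- 	b = str(i + 1)
-- 	if len(a) == 1: a = "0" + a
-- 	if len(b) == 1: b = "0" + b
-- 	return a + "_" + b + "_fsc"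
-- ===== Notes on version B (the rewrite author's own statement) =====
-- stated objective: alternative
-- what changed: A generates candidate key strings and rescans the whole keys list once per index until a candidate is absent; B makes one parsing pass that maps each canonical '<nn>_<nn+1>_fsc' key to its leading index in a set, finds the first gap by a single scan of the sorted index set, and emits the canonical keys for the indices below that gap.
import Mathlib
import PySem

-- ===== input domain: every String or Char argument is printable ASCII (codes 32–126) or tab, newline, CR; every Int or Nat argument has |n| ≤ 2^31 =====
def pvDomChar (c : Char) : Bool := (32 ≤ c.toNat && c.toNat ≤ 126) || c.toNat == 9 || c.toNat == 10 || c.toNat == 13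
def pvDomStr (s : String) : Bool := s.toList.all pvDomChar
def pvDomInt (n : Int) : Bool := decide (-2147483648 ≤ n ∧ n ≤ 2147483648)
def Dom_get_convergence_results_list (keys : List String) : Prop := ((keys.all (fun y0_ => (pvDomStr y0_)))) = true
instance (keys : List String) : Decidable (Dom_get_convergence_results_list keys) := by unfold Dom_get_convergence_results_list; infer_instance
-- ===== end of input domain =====

-- B replaces A's generate-a-candidate-and-rescan-keys-per-step loop by a parse-then-walk
-- scheme: one parsing pass maps each canonical key to its leading index in a set, the
-- sorted index set is scanned once for its first gap r, and the output is produced as the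
-- canonical keys for 0..r-1 (objective: alternative decomposition).

-- ===== PORT A =====
-- Strings are handled on their List Char view (PySem string primitives are defined there).
-- k = s1+"_"+s2+"_fsc" with s1,s2 zero-padded to two characters when of length 1:
def pvA_key (i : Int) : List Char :=
  let s1 := PySem.Int.toChars i
  let s2 := PySem.Int.toChars (i + 1)
  let s1 := if s1.length = 1 then '0' :: s1 else s1
  let s2 := if s2.length = 1 then '0' :: s2 else s2
  s1 ++ '_' :: (s2 ++ '_' :: ['f', 's', 'c'])

-- Python's 'while True: … if k in keys: append else break; i += 1'.  The fuel
-- keysL.length + 1 only makes the same computation total: the Python loop breaks at the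
-- first i whose key is absent, and keys can contain at most keysL.length distinct keys,
-- so at most keysL.length + 1 iterations ever run.
def pvA_loop (keysL : List (List Char)) : Nat → Int → List (List Char) → List (List Char)
  | 0, _, solns => solns
  | fuel + 1, i, solns =>
    let k := pvA_key i
    if k ∈ keysL then pvA_loop keysL fuel (i + 1) (solns ++ [k]) else solns

def get_convergence_results_list (keys : List String) : List String :=
  let keysL := keys.map String.toList
  let solns := if "init_00_fsc".toList ∈ keysL then ["init_00_fsc".toList] else []
  (pvA_loop keysL (keysL.length + 1) 0 solns).map String.ofList

-- ===== PORT B =====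
-- Source B's _canon(i)
def pvB_canon (i : Int) : List Char :=
  let a := PySem.Int.toChars i
  let b := PySem.Int.toChars (i + 1)
  let a := if a.length = 1 then '0' :: a else a
  let b := if b.length = 1 then '0' :: b else b
  a ++ '_' :: (b ++ '_' :: ['f', 's', 'c'])

-- parts = k.split("_"); if len(parts)==3 and parts[0].isdigit():
--   i = fold of digits of parts[0]; accepted iff k == _canon(i)
def pvB_index? (k : List Char) : Option Int :=
  match PySem.Chars.splitOn k ['_'] with
  | [p0, _p1, _p2] =>
    if PySem.Chars.strIsdigit p0 then
      let i := p0.foldl (fun a c => a * 10 + ((c.toNat : Int) - 48)) 0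
      if k = pvB_canon i then some i else none
    else none
  | _ => none

-- the single pass over keys: the init flag and the set of accepted leading indices
def pvB_scan (keysL : List (List Char)) : Bool × PySem.Set Int :=
  keysL.foldl
    (fun st k =>
      if k = "init_00_fsc".toList then (true, st.2)
      else
        match pvB_index? k with
        | some i => (st.1, PySem.Set.add st.2 i)
        | none => st)
    (false, PySem.Set.empty)

-- 'for v in sorted(idxs): if v != run: break; run += 1'
def pvB_run : List Int → Int → Int
  | [], run => run
  | v :: t, run => if v ≠ run then run else pvB_run t (run + 1)

def get_convergence_results_list_alt (keys : List String) : List String :=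
  let keysL := keys.map String.toList
  let st := pvB_scan keysL
  let run := pvB_run (PySem.List.sorted st.2 (fun x => x) false) 0
  ((if st.1 then ["init_00_fsc".toList] else []) ++ (PySem.List.pyRange 0 run 1).map pvB_canon).map String.ofList

-- ===== PRECONDITION & SPEC =====
def Spec_get_convergence_results_list (keys : List String) (out : List String) : Prop := out = get_convergence_results_list_alt keys
instance (keys : List String) (out : List String) : Decidable (Spec_get_convergence_results_list keys out) := by unfold Spec_get_convergence_results_list; infer_instance

-- ===== CLAIM (what is proved, stated in full; the proofs are below) =====
def Claim_equal_get_convergence_results_list : Prop := ∀ (keys : List String), Dom_get_convergence_results_list keys → Spec_get_convergence_results_list keys (get_convergence_results_list keys)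

-- ===== LEMMAS AND PROOFS =====

-- str(n) for n : Nat, written as the structural recursion 'digits of n/10, then n%10'
def pvDigits (n : Nat) : List Char :=
  if _h : n < 10 then [Nat.digitChar n]
  else pvDigits (n / 10) ++ [Nat.digitChar (n % 10)]
  decreasing_by exact Nat.div_lt_self (by omega) (by omega)

theorem pv_toDigitsCore_shift (f : Nat) :
    ∀ (n : Nat) (ds : List Char),
      Nat.toDigitsCore 10 f n ds = Nat.toDigitsCore 10 f n [] ++ ds := by
  induction f with
  | zero => intro n ds; simp [Nat.toDigitsCore]
  | succ f ih =>
    intro n ds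
    simp only [Nat.toDigitsCore]
    split
    · rfl
    · rw [ih (n / 10) ((n % 10).digitChar :: ds), ih (n / 10) [(n % 10).digitChar]]
      simp

theorem pv_toDigitsCore_eq_pvDigits (f : Nat) :
    ∀ (n : Nat), n < f → Nat.toDigitsCore 10 f n [] = pvDigits n := by
  induction f with
  | zero => omega
  | succ f ih =>
    intro n hn
    simp only [Nat.toDigitsCore]
    by_cases h10 : n < 10
    · have : n / 10 = 0 := by omega
      rw [pvDigits]
      simp [this, h10, Nat.mod_eq_of_lt h10]
    · have hne : ¬ n / 10 = 0 := by omega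
      rw [if_neg hne, pv_toDigitsCore_shift, ih (n / 10) (by omega)]
      conv_rhs => rw [pvDigits]
      rw [dif_neg h10]

theorem pv_toDigits_eq_pvDigits (n : Nat) : Nat.toDigits 10 n = pvDigits n :=
  pv_toDigitsCore_eq_pvDigits (n + 1) n (by omega)

theorem pv_digitChar_isdigit (d : Nat) (h : d < 10) :
    PySem.Chars.isdigit (Nat.digitChar d) = true := by
  interval_cases d <;> decide

theorem pv_digitChar_toNat (d : Nat) (h : d < 10) : (Nat.digitChar d).toNat = d + 48 := by
  interval_cases d <;> decide

theorem pv_pvDigits_digits (n : Nat) : ∀ c ∈ pvDigits n, PySem.Chars.isdigit c = true := by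
  induction n using Nat.strong_induction_on with
  | _ n ih =>
    rw [pvDigits]
    split
    · intro c hc
      rw [List.mem_singleton.mp hc]
      exact pv_digitChar_isdigit _ (by omega)
    · intro c hc
      rcases List.mem_append.mp hc with hc | hc
      · exact ih (n / 10) (Nat.div_lt_self (by omega) (by omega)) c hc
      · rw [List.mem_singleton.mp hc]
        exact pv_digitChar_isdigit _ (Nat.mod_lt _ (by omega))

theorem pv_pvDigits_ne_nil (n : Nat) : pvDigits n ≠ [] := by
  rw [pvDigits]; split <;> simp

theorem pv_pvDigits_val (n : Nat) :
    ∀ a : Int, (pvDigits n).foldl (fun a c => a * 10 + ((c.toNat : Int) - 48)) a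
      = a * 10 ^ (pvDigits n).length + (n : Int) := by
  induction n using Nat.strong_induction_on with
  | _ n ih =>
    intro a
    rw [pvDigits]
    split
    · simp only [List.foldl_cons, List.foldl_nil, List.length_cons, List.length_nil,
        zero_add, pow_one]
      rw [pv_digitChar_toNat n (by omega)]
      push_cast
      ring
    · rw [List.foldl_append, ih (n / 10) (Nat.div_lt_self (by omega) (by omega)) a]
      simp only [List.foldl_cons, List.foldl_nil, List.length_append, List.length_cons,
        List.length_nil, zero_add]
      rw [pv_digitChar_toNat (n % 10) (Nat.mod_lt _ (by omega)), pow_succ]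
      push_cast
      ring_nf
      omega

-- the padded index string s1 of pvA_key
def pvPad (i : Int) : List Char :=
  if (PySem.Int.toChars i).length = 1 then '0' :: PySem.Int.toChars i else PySem.Int.toChars i

theorem pv_toChars_nonneg (i : Int) (h : 0 ≤ i) :
    PySem.Int.toChars i = pvDigits i.toNat := by
  rw [PySem.Int.toChars, if_neg (by omega), pv_toDigits_eq_pvDigits]

theorem pv_key_eq_pad (i : Int) :
    pvA_key i = pvPad i ++ '_' :: (pvPad (i + 1) ++ '_' :: ['f', 's', 'c']) := rfl

theorem pv_canon_eq_key : pvB_canon = pvA_key := rfl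

theorem pv_pad_digits (i : Int) (h : 0 ≤ i) :
    PySem.Chars.strIsdigit (pvPad i) = true := by
  rw [pvPad, pv_toChars_nonneg i h]
  have hd := pv_pvDigits_digits i.toNat
  have hne := pv_pvDigits_ne_nil i.toNat
  split
  · simp only [PySem.Chars.strIsdigit, Bool.and_eq_true, List.all_eq_true]
    refine ⟨by simp, ?_⟩
    intro c hc
    rcases List.mem_cons.mp hc with rfl | hc
    · decide
    · exact hd c hc
  · simp only [PySem.Chars.strIsdigit, Bool.and_eq_true, List.all_eq_true]
    exact ⟨by simpa [List.isEmpty_iff] using hne, hd⟩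

theorem pv_pad_val (i : Int) (h : 0 ≤ i) :
    (pvPad i).foldl (fun a c => a * 10 + ((c.toNat : Int) - 48)) 0 = i := by
  rw [pvPad, pv_toChars_nonneg i h]
  have hv := pv_pvDigits_val i.toNat
  split
  · rw [List.foldl_cons]
    have h0 : (0 : Int) * 10 + (('0'.toNat : Int) - 48) = 0 := by decide
    rw [h0, hv 0]
    simp
    omega
  · rw [hv 0]
    simp
    omega

theorem pv_no_underscore_of_digits (s : List Char) (h : PySem.Chars.strIsdigit s = true) :
    '_' ∉ s := by
  simp only [PySem.Chars.strIsdigit, Bool.and_eq_true, List.all_eq_true] at h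
  intro hmem
  have := h.2 _ hmem
  simp [PySem.Chars.isdigit] at this

-- splitOn.go on a chunk a (no '_') followed by '_' :: b consumes exactly a and the separator
theorem pv_go_append (a : List Char) (ha : '_' ∉ a) :
    ∀ (f : Nat) (b cur : List Char) (acc : List (List Char)),
      PySem.Chars.splitOn.go ['_'] (a.length + 1 + f) (a ++ '_' :: b) cur acc
        = PySem.Chars.splitOn.go ['_'] f b [] ((cur.reverse ++ a) :: acc) := by
  induction a with
  | nil =>
    intro f b cur acc
    rw [show ([] : List Char).length + 1 + f = f + 1 by simp only [List.length_nil]; omega]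
    simp [PySem.Chars.splitOn.go, List.isPrefixOf]
  | cons c a ih =>
    intro f b cur acc
    have hc : c ≠ '_' := by intro h; exact ha (by simp [h])
    have ha' : '_' ∉ a := fun h => ha (by simp [h])
    have harith : (c :: a).length + 1 + f = (a.length + 1 + f) + 1 := by
      simp only [List.length_cons]; omega
    rw [harith]
    have hpre : (['_'] : List Char).isPrefixOf (c :: (a ++ '_' :: b)) = false := by
      simp [List.isPrefixOf]
      exact fun h => hc h.symm
    show PySem.Chars.splitOn.go ['_'] ((a.length + 1 + f) + 1) (c :: (a ++ '_' :: b)) cur acc = _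
    simp only [PySem.Chars.splitOn.go, hpre]
    rw [ih ha' f b (c :: cur) acc]
    simp

-- splitOn.go on a final chunk with no separator
theorem pv_go_last (a : List Char) (ha : '_' ∉ a) :
    ∀ (f : Nat) (cur : List Char) (acc : List (List Char)),
      PySem.Chars.splitOn.go ['_'] (a.length + 1 + f) a cur acc
        = ((cur.reverse ++ a) :: acc).reverse := by
  induction a with
  | nil =>
    intro f cur acc
    rw [show ([] : List Char).length + 1 + f = f + 1 by simp only [List.length_nil]; omega]
    simp [PySem.Chars.splitOn.go]
  | cons c a ih =>
    intro f cur acc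
    have hc : c ≠ '_' := by intro h; exact ha (by simp [h])
    have ha' : '_' ∉ a := fun h => ha (by simp [h])
    have harith : (c :: a).length + 1 + f = (a.length + 1 + f) + 1 := by
      simp only [List.length_cons]; omega
    rw [harith]
    have hpre : (['_'] : List Char).isPrefixOf (c :: a) = false := by
      simp [List.isPrefixOf]
      exact fun h => hc h.symm
    show PySem.Chars.splitOn.go ['_'] ((a.length + 1 + f) + 1) (c :: a) cur acc = _
    simp only [PySem.Chars.splitOn.go, hpre]
    rw [ih ha' f (c :: cur) acc]
    simp

theorem pv_splitOn_key (s1 s2 : List Char) (h1 : '_' ∉ s1) (h2 : '_' ∉ s2) :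
    PySem.Chars.splitOn (s1 ++ '_' :: (s2 ++ '_' :: ['f', 's', 'c'])) ['_']
      = [s1, s2, ['f', 's', 'c']] := by
  unfold PySem.Chars.splitOn
  have hlen : (s1 ++ '_' :: (s2 ++ '_' :: ['f', 's', 'c'])).length + 1
      = s1.length + 1 + (s2.length + 1 + (3 + 1 + 0)) := by simp; omega
  rw [hlen, pv_go_append s1 h1, pv_go_append s2 h2]
  have h3 : '_' ∉ (['f', 's', 'c'] : List Char) := by decide
  have := pv_go_last ['f', 's', 'c'] h3 0 [] [([] : List Char).reverse ++ s2, ([] : List Char).reverse ++ s1]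
  simpa using this

-- B's parser accepts exactly the canonical keys, returning their leading index
theorem pv_index?_key (i : Int) (h : 0 ≤ i) : pvB_index? (pvA_key i) = some i := by
  have hd1 := pv_pad_digits i h
  have hd2 := pv_pad_digits (i + 1) (by omega)
  rw [pvB_index?, pv_key_eq_pad,
    pv_splitOn_key _ _ (pv_no_underscore_of_digits _ hd1) (pv_no_underscore_of_digits _ hd2)]
  simp only [hd1, pv_pad_val i h, pv_canon_eq_key, ← pv_key_eq_pad]
  simp

theorem pv_digit_val_nonneg (p : List Char) (hd : ∀ c ∈ p, PySem.Chars.isdigit c = true) :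
    ∀ a : Int, 0 ≤ a → 0 ≤ p.foldl (fun a c => a * 10 + ((c.toNat : Int) - 48)) a := by
  induction p with
  | nil => intro a ha; simpa using ha
  | cons c t ih =>
    intro a ha
    rw [List.foldl_cons]
    have hc := hd c List.mem_cons_self
    have h48 : (48 : Int) ≤ (c.toNat : Int) := by
      simp only [PySem.Chars.isdigit, Bool.and_eq_true, decide_eq_true_eq] at hc
      have := hc.1
      simp only [Char.le_def] at this
      exact_mod_cast this
    exact ih (fun c hc => hd c (List.mem_cons_of_mem _ hc)) _ (by omega)

theorem pv_index?_some (k : List Char) (i : Int) (h : pvB_index? k = some i) :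
    0 ≤ i ∧ k = pvA_key i := by
  unfold pvB_index? at h
  rcases hs : PySem.Chars.splitOn k ['_'] with _ | ⟨p0, _ | ⟨p1, _ | ⟨p2, _ | rest⟩⟩⟩ <;>
    rw [hs] at h
  case cons.cons.cons.nil =>
    have h' : (if PySem.Chars.strIsdigit p0 = true then
        (if k = pvB_canon (p0.foldl (fun a c => a * 10 + ((c.toNat : Int) - 48)) 0)
          then some (p0.foldl (fun a c => a * 10 + ((c.toNat : Int) - 48)) 0) else none)
        else none) = some i := h
    by_cases hdig : PySem.Chars.strIsdigit p0 = true
    · rw [if_pos hdig] at h'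
      by_cases hk : k = pvB_canon (p0.foldl (fun a c => a * 10 + ((c.toNat : Int) - 48)) 0)
      · rw [if_pos hk] at h'
        have hi : p0.foldl (fun a c => a * 10 + ((c.toNat : Int) - 48)) 0 = i := by
          simpa using h'
        have hnn : 0 ≤ i := by
          rw [← hi]
          refine pv_digit_val_nonneg p0 ?_ 0 le_rfl
          simp only [PySem.Chars.strIsdigit, Bool.and_eq_true, List.all_eq_true] at hdig
          exact hdig.2
        exact ⟨hnn, by rw [hk, hi, pv_canon_eq_key]⟩
      · rw [if_neg hk] at h'; exact absurd h' (by simp)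
    · rw [if_neg hdig] at h'; exact absurd h' (by simp)
  all_goals exact absurd (show (none : Option Int) = some i from h) (by simp)

theorem pv_key_inj (i j : Int) (hi : 0 ≤ i) (hj : 0 ≤ j) (h : pvA_key i = pvA_key j) :
    i = j := by
  have h2 := pv_index?_key i hi
  rw [h, pv_index?_key j hj] at h2
  have : j = i := by simpa using h2
  omega

-- the init flag computed by the scan
theorem pv_scan_fst (initL : List Char) (keysL : List (List Char)) :
    ∀ (b : Bool) (s : PySem.Set Int),
      (keysL.foldl
        (fun st k =>
          if k = initL then (true, st.2)
          else
            match pvB_index? k with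
            | some i => (st.1, PySem.Set.add st.2 i)
            | none => st)
        (b, s)).1 = (b || decide (initL ∈ keysL)) := by
  induction keysL with
  | nil => intro b s; simp
  | cons k rest ih =>
    intro b s
    simp only [List.foldl_cons]
    by_cases hk : k = initL
    · subst hk; rw [if_pos rfl, ih]; simp
    · rw [if_neg hk]
      have hne : initL ≠ k := fun h => hk h.symm
      rcases hidx : pvB_index? k with _ | i <;> rw [ih] <;> simp [List.mem_cons, hne]

-- membership in the set computed by the scan
theorem pv_scan_snd (initL : List Char) (keysL : List (List Char)) :
    ∀ (b : Bool) (s : PySem.Set Int), s.Nodup → ∀ (x : Int),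
      (x ∈ (keysL.foldl
        (fun st k =>
          if k = initL then (true, st.2)
          else
            match pvB_index? k with
            | some i => (st.1, PySem.Set.add st.2 i)
            | none => st)
        (b, s)).2 ↔ (x ∈ s ∨ ∃ k ∈ keysL, k ≠ initL ∧ pvB_index? k = some x))
      ∧ (keysL.foldl
        (fun st k =>
          if k = initL then (true, st.2)
          else
            match pvB_index? k with
            | some i => (st.1, PySem.Set.add st.2 i)
            | none => st)
        (b, s)).2.Nodup := by
  induction keysL with
  | nil => intro b s hs x; simp [hs]
  | cons k rest ih =>
    intro b s hs x
    simp only [List.foldl_cons]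
    by_cases hk : k = initL
    · rw [if_pos hk]
      refine ⟨((ih true s hs x).1).trans ?_, (ih true s hs x).2⟩
      constructor
      · rintro (hx | ⟨k', hk', hne, hp⟩)
        · exact Or.inl hx
        · exact Or.inr ⟨k', List.mem_cons_of_mem _ hk', hne, hp⟩
      · rintro (hx | ⟨k', hk', hne, hp⟩)
        · exact Or.inl hx
        · rcases List.mem_cons.mp hk' with rfl | hk'
          · exact absurd hk hne
          · exact Or.inr ⟨k', hk', hne, hp⟩
    · rw [if_neg hk]
      rcases hidx : pvB_index? k with _ | i
      · refine ⟨((ih b s hs x).1).trans ?_, (ih b s hs x).2⟩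
        constructor
        · rintro (hx | ⟨k', hk', hne, hp⟩)
          · exact Or.inl hx
          · exact Or.inr ⟨k', List.mem_cons_of_mem _ hk', hne, hp⟩
        · rintro (hx | ⟨k', hk', hne, hp⟩)
          · exact Or.inl hx
          · rcases List.mem_cons.mp hk' with rfl | hk'
            · rw [hidx] at hp; exact absurd hp (by simp)
            · exact Or.inr ⟨k', hk', hne, hp⟩
      · have hadd := PySem.Set.nodup_add (s := s) (x := i) hs
        refine ⟨((ih b _ hadd x).1).trans ?_, (ih b _ hadd x).2⟩
        rw [PySem.Set.mem_add]
        constructor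
        · rintro ((hx | rfl) | ⟨k', hk', hne, hp⟩)
          · exact Or.inl hx
          · exact Or.inr ⟨k, List.mem_cons_self, hk, hidx⟩
          · exact Or.inr ⟨k', List.mem_cons_of_mem _ hk', hne, hp⟩
        · rintro (hx | ⟨k', hk', hne, hp⟩)
          · exact Or.inl (Or.inl hx)
          · rcases List.mem_cons.mp hk' with rfl | hk'
            · rw [hidx] at hp
              exact Or.inl (Or.inr (by simpa using hp.symm))
            · exact Or.inr ⟨k', hk', hne, hp⟩

-- the walk over the sorted index list returns the least index ≥ run missing from it
theorem pv_run_spec : ∀ (l : List Int) (r : Int), l.Pairwise (· < ·) → (∀ x ∈ l, r ≤ x) →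
    (∀ j, r ≤ j → j < pvB_run l r → j ∈ l) ∧ pvB_run l r ∉ l ∧ r ≤ pvB_run l r := by
  intro l
  induction l with
  | nil => intro r _ _; simp [pvB_run]
  | cons v t ih =>
    intro r hp hge
    rw [pvB_run]
    by_cases hv : v = r
    · rw [if_neg (by simp [hv])]
      have hp' : t.Pairwise (· < ·) := hp.of_cons
      have hgt : ∀ x ∈ t, v < x := by
        intro x hx; exact (List.pairwise_cons.mp hp).1 x hx
      have hge' : ∀ x ∈ t, r + 1 ≤ x := by
        intro x hx; have := hgt x hx; omega
      obtain ⟨h1, h2, h3⟩ := ih (r + 1) hp' hge'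
      refine ⟨?_, ?_, by omega⟩
      · intro j hj hjlt
        by_cases hjr : j = r
        · rw [hjr, ← hv]; exact List.mem_cons_self
        · exact List.mem_cons_of_mem _ (h1 j (by omega) hjlt)
      · intro hmem
        rcases List.mem_cons.mp hmem with hh | hh
        · omega
        · exact h2 hh
    · rw [if_pos (by simpa using hv)]
      have hgt : ∀ x ∈ t, v < x := by
        intro x hx; exact (List.pairwise_cons.mp hp).1 x hx
      refine ⟨by omega, ?_, le_rfl⟩
      intro hmem
      rcases List.mem_cons.mp hmem with hh | hh
      · exact hv hh.symm
      · have hge1 := hge v List.mem_cons_self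
        have := hgt r hh
        omega
  
-- A's loop, in closed form: it emits the keys for i, i+1, …, i+t-1 where t is the
-- distance to the first missing key
theorem pv_loop_form (keysL : List (List Char)) :
    ∀ (t fuel : Nat) (i : Int) (solns : List (List Char)), t < fuel →
      (∀ j : Nat, j < t → pvA_key (i + j) ∈ keysL) → pvA_key (i + t) ∉ keysL →
      pvA_loop keysL fuel i solns = solns ++ (List.range t).map (fun j : Nat => pvA_key (i + (j : Int))) := by
  intro t
  induction t with
  | zero =>
    intro fuel i solns hfuel _ hmiss
    obtain ⟨f, rfl⟩ : ∃ f, fuel = f + 1 := ⟨fuel - 1, by omega⟩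
    simp only [pvA_loop]
    rw [if_neg (by simpa using hmiss)]
    simp
  | succ t ih =>
    intro fuel i solns hfuel hin hmiss
    obtain ⟨f, rfl⟩ : ∃ f, fuel = f + 1 := ⟨fuel - 1, by omega⟩
    simp only [pvA_loop]
    have h0 : pvA_key i ∈ keysL := by
      have := hin 0 (by omega)
      simpa using this
    rw [if_pos h0]
    rw [ih f (i + 1) (solns ++ [pvA_key i]) (by omega)
      (fun j hj => by
        have := hin (j + 1) (by omega)
        push_cast at this ⊢
        convert this using 2
        ring)
      (by
        have : i + 1 + (t : Int) = i + ((t : Nat) + 1 : Nat) := by push_cast; ring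
        rw [this]
        exact hmiss)]
    rw [List.range_succ_eq_map, List.map_cons, List.map_map]
    have hhead : pvA_key (i + ((0 : Nat) : Int)) = pvA_key i := by norm_num
    rw [hhead]
    have htail : (List.range t).map ((fun j : Nat => pvA_key (i + (j : Int))) ∘ Nat.succ)
        = (List.range t).map (fun j : Nat => pvA_key (i + 1 + (j : Int))) := by
      apply List.map_congr_left
      intro j hj
      simp only [Function.comp_apply]
      congr 1
      push_cast
      ring
    rw [htail, List.append_assoc]
    simp

-- ===== VERDICT (by name: the statement is the Claim_ definition above) =====
theorem get_convergence_results_list_spec : Claim_equal_get_convergence_results_list := by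
  intro keys _
  unfold Spec_get_convergence_results_list
  unfold get_convergence_results_list get_convergence_results_list_alt
  simp only []
  set keysL := keys.map String.toList with hkeysL
  -- the scan
  have hscan := fun x => pv_scan_snd "init_00_fsc".toList keysL false PySem.Set.empty (by simp [PySem.Set.empty]) x
  have hS : ∀ x : Int, x ∈ (pvB_scan keysL).2 ↔ (0 ≤ x ∧ pvA_key x ∈ keysL) := by
    intro x
    rw [pvB_scan, (hscan x).1]
    constructor
    · rintro (hx | ⟨k, hk, _, hp⟩)
      · simp [PySem.Set.empty] at hx
      · obtain ⟨hnn, rfl⟩ := pv_index?_some k x hp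
        exact ⟨hnn, hk⟩
    · rintro ⟨hnn, hk⟩
      refine Or.inr ⟨pvA_key x, hk, ?_, pv_index?_key x hnn⟩
      intro hkey
      have : '0' ≤ (pvA_key x).headI ∧ (pvA_key x).headI ≤ '9' := by
        have hd := pv_pad_digits x hnn
        rw [pv_key_eq_pad]
        rcases hp : pvPad x with _ | ⟨c, t⟩
        · rw [hp] at hd; simp [PySem.Chars.strIsdigit] at hd
        · rw [hp] at hd
          simp only [PySem.Chars.strIsdigit, Bool.and_eq_true, List.all_eq_true] at hd
          have := hd.2 c List.mem_cons_self
          simp only [PySem.Chars.isdigit, Bool.and_eq_true, decide_eq_true_eq] at this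
          simpa using this
      rw [hkey] at this
      revert this
      decide
    
  have hnodup : (pvB_scan keysL).2.Nodup := by
    rw [pvB_scan]; exact (hscan 0).2
  -- the sorted index list
  set l := PySem.List.sorted (pvB_scan keysL).2 (fun x => x) false with hl
  have hperm : l.Perm (pvB_scan keysL).2 := PySem.List.sorted_perm _ _ _
  have hlmem : ∀ x : Int, x ∈ l ↔ (0 ≤ x ∧ pvA_key x ∈ keysL) := by
    intro x
    rw [hperm.mem_iff]
    exact hS x
  have hlnodup : l.Nodup := hperm.nodup_iff.mpr hnodup
  have hle : l.Pairwise (fun a b => a ≤ b) := by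
    have := PySem.List.sorted_pairwise (xs := (pvB_scan keysL).2) (key := fun x : Int => x) 
    exact this
  have hlt : l.Pairwise (· < ·) := by
    have hand := hle.and hlnodup
    exact hand.imp (fun h => lt_of_le_of_ne h.1 h.2)
  -- the run
  set m := pvB_run l 0 with hm
  obtain ⟨hbelow, hmiss, hm0⟩ := pv_run_spec l 0 hlt (fun x hx => ((hlmem x).mp hx).1)
  have hkeymiss : pvA_key m ∉ keysL := by
    intro hk
    exact hmiss ((hlmem m).mpr ⟨hm0, hk⟩)
  have hkeyin : ∀ j : Nat, (j : Int) < m → pvA_key (j : Int) ∈ keysL := by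
    intro j hj
    exact ((hlmem j).mp (hbelow j (by omega) hj)).2
  -- fuel is enough: the m keys below the gap are distinct members of keysL
  have hfuel : m.toNat < keysL.length + 1 := by
    have hsub : ((List.range m.toNat).map (fun j : Nat => pvA_key (j : Int))) ⊆ keysL := by
      intro x hx
      obtain ⟨j, hj, rfl⟩ := List.mem_map.mp hx
      exact hkeyin j (by have := List.mem_range.mp hj; omega)
    have hnd : ((List.range m.toNat).map (fun j : Nat => pvA_key (j : Int))).Nodup := by
      refine List.Nodup.map_on ?_ (List.nodup_range)
      intro a ha b hb hab
      have := pv_key_inj (a : Int) (b : Int) (by omega) (by omega) hab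
      omega
    have := (List.subperm_of_subset hnd hsub).length_le
    simp at this
    omega
  -- A's loop in closed form
  have hA := pv_loop_form keysL m.toNat (keysL.length + 1) 0
    (if "init_00_fsc".toList ∈ keysL then ["init_00_fsc".toList] else [])
    hfuel
    (fun j hj => by
      have : (0 : Int) + (j : Int) = (j : Int) := by ring
      rw [this]
      exact hkeyin j (by omega))
    (by
      have : (0 : Int) + (m.toNat : Int) = m := by omega
      rw [this]
      exact hkeymiss)
  rw [hA]
  -- B's output in the same form
  have hB : (PySem.List.pyRange 0 m 1).map pvB_canon
      = (List.range m.toNat).map (fun j : Nat => pvA_key (0 + (j : Int))) := by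
    rw [PySem.List.pyRange_one, List.map_map]
    have : (m - 0).toNat = m.toNat := by omega
    rw [this]
    apply List.map_congr_left
    intro j hj
    simp [pv_canon_eq_key]
  rw [hB]
  -- the init flag
  have hinit : (pvB_scan keysL).1 = decide ("init_00_fsc".toList ∈ keysL) := by
    rw [pvB_scan, pv_scan_fst]
    simp
  rw [hinit]
  simp
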